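-- pv_equiv track=rewrite | github.com/Kyium/Minesweeper | qolfac.py | quote_escape
-- ===== SOURCE A (Python) =====
-- def quote_escape(str_in: str):
--     str_out = ""
--     for char in str_in:
--         str_out += char
--         if char == "\"":
--             str_out += "\""
--         elif char == "'":
--             str_out += "'"
--     return str_out
-- ===== SOURCE B (Python) =====
-- def quote_escape(str_in: str):
--     return str_in.replace('"', '""').replace("'", "''")
-- ===== Notes on version B (the rewrite author's own statement) =====
-- stated objective: idiomatic
-- what changed: Replaces the character-by-character accumulating loop with two chained whole-string str.replace substitutions, one per quote character (C-level scan instead of a Python-level per-character loop).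
import Mathlib
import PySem

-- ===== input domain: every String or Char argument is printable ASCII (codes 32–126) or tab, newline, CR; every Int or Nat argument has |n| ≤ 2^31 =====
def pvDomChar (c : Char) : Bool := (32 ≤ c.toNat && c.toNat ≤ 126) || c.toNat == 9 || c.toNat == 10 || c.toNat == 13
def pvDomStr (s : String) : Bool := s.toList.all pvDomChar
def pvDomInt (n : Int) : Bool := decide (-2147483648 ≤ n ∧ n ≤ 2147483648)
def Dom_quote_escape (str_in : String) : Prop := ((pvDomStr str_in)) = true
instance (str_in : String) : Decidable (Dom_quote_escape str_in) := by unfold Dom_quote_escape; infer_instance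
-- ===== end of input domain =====

-- B replaces A's character-accumulating loop with two chained whole-string replace substitutions (idiomatic).

-- ===== PORT A =====
def quote_escape (str_in : String) : String :=
  str_in.toList.foldl (fun str_out char =>
    let str_out := str_out ++ String.ofList [char]
    if char = '"' then str_out ++ "\""
    else if char = '\'' then str_out ++ "'"
    else str_out) ""

-- ===== PORT B =====
def quote_escape_alt (str_in : String) : String :=
  PySem.Str.replace (PySem.Str.replace str_in "\"" "\"\"") "'" "''"

-- ===== PRECONDITION & SPEC =====
def Spec_quote_escape (str_in : String) (out : String) : Prop := out = quote_escape_alt str_in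
instance (str_in : String) (out : String) : Decidable (Spec_quote_escape str_in out) := by unfold Spec_quote_escape; infer_instance

-- ===== CLAIM (what is proved, stated in full; the proofs are below) =====
def Claim_equal_quote_escape : Prop := ∀ (str_in : String), Dom_quote_escape str_in → Spec_quote_escape str_in (quote_escape str_in)

-- ===== LEMMAS AND PROOFS =====

-- replace with a single-char pattern is a per-character flatMap
theorem go_single (c : Char) (new : List Char) :
    ∀ (l : List Char) (fuel : Nat) (acc : List Char), l.length ≤ fuel →
      PySem.Chars.replace.go [c] new fuel l acc
        = acc.reverse ++ l.flatMap (fun x => if x = c then new else [x]) := by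
  intro l
  induction l with
  | nil =>
    intro fuel acc _
    cases fuel <;> simp [PySem.Chars.replace.go]
  | cons h t ih =>
    intro fuel acc hle
    cases fuel with
    | zero => simp at hle
    | succ f =>
      simp only [PySem.Chars.replace.go]
      by_cases hc : h = c
      · subst hc
        have : List.isPrefixOf [h] (h :: t) = true := by simp [List.isPrefixOf]
        simp [this, ih f (new.reverse ++ acc) (by simpa using hle)]
      · have : List.isPrefixOf [c] (h :: t) = false := by
          simp [List.isPrefixOf]; exact fun e => (hc e.symm).elim
        simp [this, ih f (h :: acc) (by simpa using hle), hc]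

theorem replace_single (c : Char) (new : List Char) (s : List Char) :
    PySem.Chars.replace s [c] new = s.flatMap (fun x => if x = c then new else [x]) := by
  simpa using go_single c new s s.length [] le_rfl

-- A's loop with a general accumulator
theorem foldA (l : List Char) : ∀ (acc : String),
    (l.foldl (fun str_out char =>
      let str_out := str_out ++ String.ofList [char]
      if char = '"' then str_out ++ "\""
      else if char = '\'' then str_out ++ "'"
      else str_out) acc).toList
      = acc.toList ++ l.flatMap (fun x => x :: (if x = '"' then ['"'] else if x = '\'' then ['\''] else [])) := by
  induction l with
  | nil => intro acc; simp
  | cons h t ih =>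
    intro acc
    by_cases h1 : h = '"'
    · simp [h1, ih]
    · by_cases h2 : h = '\''
      · simp [h2, ih]
      · simp [h1, h2, ih]

-- ===== VERDICT (by name: the statement is the Claim_ definition above) =====
theorem quote_escape_spec : Claim_equal_quote_escape := by
  intro s _
  unfold Spec_quote_escape quote_escape quote_escape_alt
  apply String.ext
  rw [foldA]
  simp only [PySem.Str.toList_replace]
  show [] ++ _ = _
  rw [List.nil_append]
  have h1 : ("\"" : String).toList = ['"'] := rfl
  have h2 : ("\"\"" : String).toList = ['"', '"'] := rfl
  have h3 : ("'" : String).toList = ['\''] := rfl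
  have h4 : ("''" : String).toList = ['\'', '\''] := rfl
  rw [h1, h2, h3, h4, replace_single, replace_single, List.flatMap_assoc]
  apply List.flatMap_congr
  intro c _
  by_cases hc1 : c = '"' <;> by_cases hc2 : c = '\'' <;> simp_all
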